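-- pv_equiv track=rewrite | github.com/AlexAredov/ege_pyth | hw17_jn_2022/3.py | f
-- ===== SOURCE A (Python) =====
-- def f(x, h, y):
--     if x == y: return 1
--     elif x > y: return 0
--     else:
--         if h == 0:
--             return f(x + 1, 1, y) + f(x + 3, 0, y) + f(x * 2, 0, y)
--         else:
--             return f(x + 3, 0, y) + f(x * 2, 0, y)
-- ===== SOURCE B (Python) =====
-- def f(x, h, y):
--     # Bottom-up DP over positions x..y instead of A's exponential recursion.
--     if x == y:
--         return 1
--     if x > y:
--         return 0
--     d0 = {y: 1}  # number of paths from i with "h == 0" state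
--     d1 = {y: 1}  # number of paths from i with "h != 0" state
--     for i in range(y - 1, x - 1, -1):
--         b = d0.get(i + 3, 0) + d0.get(2 * i, 0)
--         d0[i] = d1.get(i + 1, 0) + b
--         d1[i] = b
--     return d0.get(x, 0) if h == 0 else d1.get(x, 0)
-- ===== Notes on version B (the rewrite author's own statement) =====
-- stated objective: faster
-- what changed: Replaces A's exponential three-way recursion by a bottom-up dynamic program that tabulates, for each position i from y down to x, the path counts for the two reachable h-states (h==0 and h!=0).
import Mathlib
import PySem

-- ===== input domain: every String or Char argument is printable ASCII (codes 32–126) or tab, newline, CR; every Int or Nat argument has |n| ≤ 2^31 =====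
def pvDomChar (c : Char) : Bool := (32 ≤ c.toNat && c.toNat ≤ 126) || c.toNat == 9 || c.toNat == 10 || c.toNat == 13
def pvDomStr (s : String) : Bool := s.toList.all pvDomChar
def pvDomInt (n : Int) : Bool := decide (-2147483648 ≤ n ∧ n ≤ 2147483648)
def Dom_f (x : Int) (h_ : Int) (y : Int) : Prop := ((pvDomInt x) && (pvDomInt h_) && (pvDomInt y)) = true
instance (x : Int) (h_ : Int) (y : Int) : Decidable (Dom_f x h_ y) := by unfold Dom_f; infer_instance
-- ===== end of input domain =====

-- B replaces A's exponential three-way recursion by a bottom-up DP over positions (faster, asymptotic).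


-- ===== PORT A =====
-- A's recursion, made total with fuel; on Pre_f the fuel (y - x).toNat is never exhausted
-- (each recursive call increases x by at least 1 when 1 ≤ x).
def fA (fuel : Nat) (x h_ y : Int) : Int :=
  if x = y then 1
  else if y < x then 0
  else
    match fuel with
    | 0 => 0
    | n + 1 =>
      if h_ = 0 then fA n (x + 1) 1 y + fA n (x + 3) 0 y + fA n (x * 2) 0 y
      else fA n (x + 3) 0 y + fA n (x * 2) 0 y

def f (x : Int) (h_ : Int) (y : Int) : Int := fA (y - x).toNat x h_ y

-- ===== PORT B =====
-- one DP step of B's loop body: from the tables for positions > i, fill position i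
def fStep (p : PySem.Dict Int Int × PySem.Dict Int Int) (i : Int) :
    PySem.Dict Int Int × PySem.Dict Int Int :=
  let b := p.1.getD (i + 3) 0 + p.1.getD (2 * i) 0
  (p.1.insert i (p.2.getD (i + 1) 0 + b), p.2.insert i b)

def f_alt (x : Int) (h_ : Int) (y : Int) : Int :=
  if x = y then 1
  else if y < x then 0
  else
    let p := (PySem.List.pyRange (y - 1) (x - 1) (-1)).foldl fStep
      (PySem.Dict.insert PySem.Dict.empty y 1, PySem.Dict.insert PySem.Dict.empty y 1)
    if h_ = 0 then p.1.getD x 0 else p.2.getD x 0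

-- ===== PRECONDITION & SPEC =====
-- Pre_f excludes exactly x ≤ 0 ∧ x < y, where Python A recurses forever on x*2 (RecursionError).
def Pre_f (x : Int) (h_ : Int) (y : Int) : Prop := 1 ≤ x ∨ y ≤ x
instance (x : Int) (h_ : Int) (y : Int) : Decidable (Pre_f x h_ y) := by unfold Pre_f; infer_instance
def pvWitness_f : Int × Int × Int := (1, 0, 12)

def Spec_f (x : Int) (h_ : Int) (y : Int) (out : Int) : Prop := out = f_alt x h_ y
instance (x : Int) (h_ : Int) (y : Int) (out : Int) : Decidable (Spec_f x h_ y out) := by unfold Spec_f; infer_instance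

-- ===== CLAIM (what is proved, stated in full; the proofs are below) =====
def Claim_equal_f : Prop := ∀ (x : Int) (h_ : Int) (y : Int), Dom_f x h_ y → Pre_f x h_ y → Spec_f x h_ y (f x h_ y)

-- ===== LEMMAS AND PROOFS =====

theorem fA_base_eq (fuel : Nat) (x h_ y : Int) (h : x = y) : fA fuel x h_ y = 1 := by
  cases fuel <;> simp [fA, h]

theorem fA_base_gt (fuel : Nat) (x h_ y : Int) (h : y < x) : fA fuel x h_ y = 0 := by
  cases fuel <;> simp [fA, h, (show ¬ x = y by omega)]

-- fuel irrelevance: any sufficient fuel computes the same value (for 1 ≤ x)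
theorem fA_fuel : ∀ (n m : Nat) (x h_ y : Int), 1 ≤ x → (y - x).toNat ≤ n → (y - x).toNat ≤ m →
    fA n x h_ y = fA m x h_ y := by
  intro n
  induction n with
  | zero =>
    intro m x h_ y hx hn _
    rcases eq_or_lt_of_le (show y ≤ x by omega) with h | h
    · rw [fA_base_eq 0 x h_ y h.symm, fA_base_eq m x h_ y h.symm]
    · rw [fA_base_gt 0 x h_ y h, fA_base_gt m x h_ y h]
  | succ n ih =>
    intro m x h_ y hx hn hm
    by_cases hxy : x = y
    · rw [fA_base_eq _ x h_ y hxy, fA_base_eq m x h_ y hxy]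
    by_cases hlt : y < x
    · rw [fA_base_gt _ x h_ y hlt, fA_base_gt m x h_ y hlt]
    have hxy' : x < y := by omega
    obtain ⟨m', rfl⟩ : ∃ m', m = m' + 1 := ⟨m - 1, by omega⟩
    have h1 : fA n (x + 1) 1 y = fA m' (x + 1) 1 y := ih m' (x + 1) 1 y (by omega) (by omega) (by omega)
    have h3 : fA n (x + 3) 0 y = fA m' (x + 3) 0 y := ih m' (x + 3) 0 y (by omega) (by omega) (by omega)
    have h2 : fA n (x * 2) 0 y = fA m' (x * 2) 0 y := ih m' (x * 2) 0 y (by omega) (by omega) (by omega)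
    simp only [fA, if_neg hxy, if_neg hlt]
    rw [h1, h3, h2]

theorem f_base_eq (x h_ y : Int) (h : x = y) : f x h_ y = 1 := fA_base_eq _ x h_ y h

theorem f_base_gt (x h_ y : Int) (h : y < x) : f x h_ y = 0 := fA_base_gt _ x h_ y h

-- A's recurrence
theorem f_rec (x h_ y : Int) (hx : 1 ≤ x) (hxy : x < y) :
    f x h_ y = if h_ = 0 then f (x + 1) 1 y + f (x + 3) 0 y + f (x * 2) 0 y
               else f (x + 3) 0 y + f (x * 2) 0 y := by
  obtain ⟨n, hn⟩ : ∃ n, (y - x).toNat = n + 1 := ⟨(y - x).toNat - 1, by omega⟩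
  have e1 : fA n (x + 1) 1 y = f (x + 1) 1 y := fA_fuel n _ _ _ _ (by omega) (by omega) le_rfl
  have e3 : fA n (x + 3) 0 y = f (x + 3) 0 y := fA_fuel n _ _ _ _ (by omega) (by omega) le_rfl
  have e2 : fA n (x * 2) 0 y = f (x * 2) 0 y := fA_fuel n _ _ _ _ (by omega) (by omega) le_rfl
  show fA (y - x).toNat x h_ y = _
  rw [hn]
  simp only [fA, if_neg (show ¬ x = y by omega), if_neg (show ¬ y < x by omega)]
  rw [e1, e3, e2]

-- the loop invariant: both tables agree with f for every position ≥ j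
def DPInv (y j : Int) (p : PySem.Dict Int Int × PySem.Dict Int Int) : Prop :=
  ∀ k : Int, j ≤ k → p.1.getD k 0 = f k 0 y ∧ p.2.getD k 0 = f k 1 y

theorem inv_init (y : Int) :
    DPInv y y (PySem.Dict.insert PySem.Dict.empty y 1, PySem.Dict.insert PySem.Dict.empty y 1) := by
  intro k hk
  rcases eq_or_lt_of_le hk with h | h
  · subst h
    simp [PySem.Dict.getD_insert_self, f_base_eq y 0 y rfl, f_base_eq y 1 y rfl]
  · simp [PySem.Dict.getD_insert, (show ¬ k = y by omega), PySem.Dict.getD_empty,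
      f_base_gt k 0 y h, f_base_gt k 1 y h]

theorem inv_step (y i : Int) (p : PySem.Dict Int Int × PySem.Dict Int Int)
    (hi1 : 1 ≤ i) (hiy : i < y) (hp : DPInv y (i + 1) p) : DPInv y i (fStep p i) := by
  have hb : p.1.getD (i + 3) 0 + p.1.getD (2 * i) 0 = f (i + 3) 0 y + f (i * 2) 0 y := by
    have h3 := (hp (i + 3) (by omega)).1
    by_cases h2i : i + 1 ≤ 2 * i
    · have h2 := (hp (2 * i) h2i).1
      rw [h3, h2]; ring_nf
    · have hi1' : i = 1 := by omega
      subst hi1'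
      omega
  intro k hk
  rcases eq_or_lt_of_le hk with h | h
  · subst h
    refine ⟨?_, ?_⟩
    · show (p.1.insert i _).getD i 0 = _
      rw [PySem.Dict.getD_insert, if_pos rfl, (hp (i + 1) (by omega)).2, hb,
        f_rec i 0 y hi1 hiy, if_pos rfl]
      ring
    · show (p.2.insert i _).getD i 0 = _
      rw [PySem.Dict.getD_insert, if_pos rfl, hb, f_rec i 1 y hi1 hiy,
        if_neg (show ¬ (1:Int) = 0 by norm_num)]
  · refine ⟨?_, ?_⟩
    · show (p.1.insert i _).getD k 0 = _
      rw [PySem.Dict.getD_insert, if_neg (show ¬ k = i by omega)]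
      exact (hp k (by omega)).1
    · show (p.2.insert i _).getD k 0 = _
      rw [PySem.Dict.getD_insert, if_neg (show ¬ k = i by omega)]
      exact (hp k (by omega)).2

theorem inv_loop (y x : Int) (hx : 1 ≤ x) :
    ∀ (n : Nat) (j : Int) (p : PySem.Dict Int Int × PySem.Dict Int Int),
      j < y → (j + 1 - x).toNat = n → DPInv y (j + 1) p →
      DPInv y x ((PySem.List.pyRange j (x - 1) (-1)).foldl fStep p) := by
  intro n
  induction n with
  | zero =>
    intro j p _ hn hp
    rw [PySem.List.pyRange_neg_one_eq_nil (show j ≤ x - 1 by omega)]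
    intro k hk
    exact hp k (by omega)
  | succ n ih =>
    intro j p hjy hn hp
    rw [PySem.List.pyRange_neg_one_cons (show x - 1 < j by omega)]
    simp only [List.foldl_cons]
    exact ih (j - 1) (fStep p j) (by omega) (by omega)
      (by simpa using inv_step y j p (by omega) hjy hp)

-- ===== VERDICT (by name: the statement is the Claim_ definition above) =====
theorem f_spec : Claim_equal_f := by
  intro x h_ y _ hpre
  unfold Spec_f
  by_cases hxy : x = y
  · simp only [f_alt, if_pos hxy]
    exact f_base_eq x h_ y hxy
  by_cases hlt : y < x
  · simp only [f_alt, if_neg hxy, if_pos hlt]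
    exact f_base_gt x h_ y hlt
  have hxy' : x < y := by omega
  have hx : 1 ≤ x := by
    rcases hpre with h | h
    · exact h
    · omega
  simp only [f_alt, if_neg hxy, if_neg hlt]
  have hinv := inv_loop y x hx (y - x).toNat (y - 1)
    (PySem.Dict.insert PySem.Dict.empty y 1, PySem.Dict.insert PySem.Dict.empty y 1)
    (by omega) (by omega) (by simpa using inv_init y)
  have h0 := (hinv x le_rfl).1
  have h1 := (hinv x le_rfl).2
  by_cases hh : h_ = 0
  · rw [if_pos hh, h0, hh]
  · rw [if_neg hh, h1, f_rec x h_ y hx hxy', f_rec x 1 y hx hxy',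
      if_neg hh, if_neg (show ¬ (1:Int) = 0 by norm_num)]
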